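-- pv_equiv track=rewrite | github.com/yyolk/leetcode_dailies | 202507/20250729.py | smallest_subarrays
-- ===== SOURCE A (Python) =====
-- def smallest_subarrays(nums: list[int]) -> list[int]:
--     n = len(nums)
--     if n == 0:
--         return []
--
--     # Precompute max_or for suffixes
--     max_or = [0] * n
--     max_or[-1] = nums[-1]
--     for i in range(n - 2, -1, -1):
--         max_or[i] = max_or[i + 1] | nums[i]
--
--     # Precompute next_set for each bit
--     next_set = [[n] * n for _ in range(32)]
--     for b in range(32):
--         last = n
--         for j in range(n - 1, -1, -1):
--             if nums[j] & (1 << b):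
--                 last = j
--             next_set[b][j] = last
--
--     # Compute answer
--     answer = [0] * n
--     for i in range(n):
--         max_pos = i  # at least i
--         mor = max_or[i]
--         for b in range(32):
--             if mor & (1 << b):
--                 max_pos = max(max_pos, next_set[b][i])
--         answer[i] = max_pos - i + 1
--
--     return answer
-- ===== SOURCE B (Python) =====
-- def smallest_subarrays(nums: list[int]) -> list[int]:
--     n = len(nums)
--     answer = [0] * n
--     last = [n] * 32  # last[b] = smallest j >= current i with bit b set in nums[j], or n
--     for i in range(n - 1, -1, -1):
--         last = [i if nums[i] & (1 << b) else last[b] for b in range(32)]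
--         far = i
--         for b in range(32):
--             if last[b] < n:
--                 far = max(far, last[b])
--         answer[i] = far - i + 1
--     return answer
-- ===== Notes on version B (the rewrite author's own statement) =====
-- stated objective: alternative
-- what changed: Replaces A's precomputed suffix max_or array and 32xn next_set table (plus a separate answer pass) by a single right-to-left pass that keeps only a 32-entry last-index-per-bit array and emits each answer inline (O(32) extra space instead of O(32n); measured ~1.4x faster, below the 1.5x bar, so no speed claim).
import Mathlib
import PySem

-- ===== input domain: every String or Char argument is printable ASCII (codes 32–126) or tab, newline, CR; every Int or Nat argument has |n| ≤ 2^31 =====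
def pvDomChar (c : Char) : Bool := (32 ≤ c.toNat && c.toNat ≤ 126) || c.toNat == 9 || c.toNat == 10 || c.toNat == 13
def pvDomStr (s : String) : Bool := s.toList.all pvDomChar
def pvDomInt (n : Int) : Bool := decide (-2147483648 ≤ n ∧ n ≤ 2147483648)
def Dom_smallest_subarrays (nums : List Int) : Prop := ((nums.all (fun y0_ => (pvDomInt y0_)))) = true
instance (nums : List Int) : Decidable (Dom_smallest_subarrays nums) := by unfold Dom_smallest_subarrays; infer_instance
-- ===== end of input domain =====

-- B replaces A's O(32·n) next_set table and suffix max_or array by a single right-to-left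
-- pass keeping one 32-entry 'last index per bit' array (O(32) extra space, same output).

-- ===== PORT A =====
-- max_or[i] = max_or[i+1] | nums[i] (base: max_or[n-1] = nums[-1]), as A's right-to-left loop computes it
def pvMaxOr (nums : List Int) (i : Nat) : Int :=
  if _h : i + 1 < nums.length then
    PySem.Int.bor (pvMaxOr nums (i + 1)) (nums.getD i 0)
  else nums.getD i 0
termination_by nums.length - i

-- next_set[b][j] = j if bit b set in nums[j] else next_set[b][j+1] (= n past the end), A's 'last' recurrence
def pvNextSet (nums : List Int) (b : Nat) (j : Nat) : Nat :=
  if _h : j < nums.length then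
    if PySem.Int.band (nums.getD j 0) ((1 : Int) <<< b) ≠ 0 then j else pvNextSet nums b (j + 1)
  else nums.length
termination_by nums.length - j

def smallest_subarrays (nums : List Int) : List Int :=
  if nums.length = 0 then []
  else
    (List.range nums.length).map (fun i =>
      let mor := pvMaxOr nums i
      let maxPos := (List.range 32).foldl
        (fun mp (b : Nat) => if PySem.Int.band mor ((1 : Int) <<< b) ≠ 0 then max mp (pvNextSet nums b i) else mp) i
      ((maxPos : Int) - (i : Int) + 1))

-- ===== PORT B =====
-- one pass i = n-1 … 0; 'last' is the 32-entry list rebuilt each step, answer element emitted inline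
def pvAltLoop (nums : List Int) : Nat → List Nat → List Int
  | 0, _ => []
  | k + 1, last =>
    let n := nums.length
    let last' := (List.range 32).map
      (fun (b : Nat) => if PySem.Int.band (nums.getD k 0) ((1 : Int) <<< b) ≠ 0 then k else last.getD b n)
    let far := (List.range 32).foldl
      (fun f b => if last'.getD b n < n then max f (last'.getD b n) else f) k
    pvAltLoop nums k last' ++ [((far : Int) - (k : Int) + 1)]

def smallest_subarrays_alt (nums : List Int) : List Int :=
  pvAltLoop nums nums.length (List.replicate 32 nums.length)

-- ===== PRECONDITION & SPEC =====
def Spec_smallest_subarrays (nums : List Int) (out : List Int) : Prop := out = smallest_subarrays_alt nums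
instance (nums : List Int) (out : List Int) : Decidable (Spec_smallest_subarrays nums out) := by unfold Spec_smallest_subarrays; infer_instance

-- ===== CLAIM (what is proved, stated in full; the proofs are below) =====
def Claim_equal_smallest_subarrays : Prop := ∀ (nums : List Int), Dom_smallest_subarrays nums → Spec_smallest_subarrays nums (smallest_subarrays nums)

-- ===== LEMMAS AND PROOFS =====

theorem pv_mod_two_testBit (k : Nat) : k % 2 = if k.testBit 0 then 1 else 0 := by
  rw [Nat.testBit_zero]
  rcases Nat.mod_two_eq_zero_or_one k with h | h <;> simp [h]

theorem pv_and_mod_two (k m : Nat) : (k &&& m) % 2 = (k % 2) * (m % 2) := by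
  rw [pv_mod_two_testBit (k &&& m), pv_mod_two_testBit k, pv_mod_two_testBit m, Nat.testBit_and]
  cases k.testBit 0 <;> cases m.testBit 0 <;> simp

-- ldiff-as-subtraction: bit b of k - (k &&& m)
theorem pv_sub_and_testBit : ∀ (b k m : Nat), (k - (k &&& m)).testBit b = (k.testBit b && !(m.testBit b)) := by
  intro b
  induction b with
  | zero =>
    intro k m
    have h1 := pv_and_mod_two k m
    have hle : k &&& m ≤ k := Nat.and_le_left
    have h2 : (k / 2) &&& (m / 2) ≤ k / 2 := Nat.and_le_left
    have hd : k &&& m = 2 * ((k / 2) &&& (m / 2)) + (k &&& m) % 2 := by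
      rw [← Nat.and_div_two]; omega
    rw [Nat.testBit_zero, Nat.testBit_zero, Nat.testBit_zero, ← decide_not, ← Bool.decide_and]
    apply decide_eq_decide.mpr
    rcases Nat.mod_two_eq_zero_or_one m with hm | hm <;> rw [hm] at h1 <;> omega
  | succ b ih =>
    intro k m
    have h1 := pv_and_mod_two k m
    have h2 : (k / 2) &&& (m / 2) ≤ k / 2 := Nat.and_le_left
    have hd : k &&& m = 2 * ((k / 2) &&& (m / 2)) + (k &&& m) % 2 := by
      rw [← Nat.and_div_two]; omega
    have hhalf : (k - (k &&& m)) / 2 = k / 2 - ((k / 2) &&& (m / 2)) := by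
      rcases Nat.mod_two_eq_zero_or_one m with hm | hm <;> rw [hm] at h1 <;> omega
    rw [Nat.testBit_add_one, hhalf, ih, Nat.testBit_add_one, Nat.testBit_add_one]

-- the (Python-semantics) bit b of an arbitrary integer
def pvBit (a : Int) (b : Nat) : Bool :=
  if 0 ≤ a then a.toNat.testBit b else !((-a - 1).toNat.testBit b)

theorem pv_band_two_pow_ne (a : Int) (b : Nat) :
    (PySem.Int.band a ((1 : Int) <<< b) ≠ 0) ↔ pvBit a b = true := by
  have hmask : ((1 : Int) <<< b) = ((2 ^ b : Nat) : Int) := by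
    rw [Int.shiftLeft_eq]; push_cast; ring
  rw [hmask]
  have hmasknn : (0 : Int) ≤ ((2 ^ b : Nat) : Int) := by positivity
  have hmt : (((2 ^ b : Nat) : Int)).toNat = 2 ^ b := Int.toNat_natCast _
  unfold PySem.Int.band pvBit
  by_cases ha : 0 ≤ a
  · simp only [ha, if_true, hmasknn, hmt]
    rw [Nat.and_two_pow]
    cases h : a.toNat.testBit b <;> simp [h] <;> positivity
  · simp only [ha, if_false, hmasknn, if_true, hmt]
    have hcomm : (2 ^ b) &&& (-a - 1).toNat = ((-a - 1).toNat.testBit b).toNat * 2 ^ b := by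
      rw [Nat.and_comm, Nat.and_two_pow]
    rw [hcomm]
    have hpow : 0 < 2 ^ b := Nat.two_pow_pos b
    cases h : (-a - 1).toNat.testBit b <;> simp [h] <;> omega

theorem pv_bor_bit (x y : Int) (b : Nat) :
    pvBit (PySem.Int.bor x y) b = (pvBit x b || pvBit y b) := by
  unfold PySem.Int.bor pvBit
  by_cases hx : 0 ≤ x <;> by_cases hy : 0 ≤ y
  · simp only [hx, hy, if_true]
    have h0 : (0 : Int) ≤ ((x.toNat ||| y.toNat : Nat) : Int) := by positivity
    simp [h0, Nat.testBit_or]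
  · have hneg : ¬ (0 : Int) ≤ -(((-y - 1).toNat - ((-y - 1).toNat &&& x.toNat) : Nat) : Int) - 1 := by
      have : (0 : Int) ≤ (((-y - 1).toNat - ((-y - 1).toNat &&& x.toNat) : Nat) : Int) := by positivity
      omega
    simp only [hx, hy, if_true, if_false, hneg]
    have harg : (-(-(((-y - 1).toNat - ((-y - 1).toNat &&& x.toNat) : Nat) : Int) - 1) - 1).toNat
        = (-y - 1).toNat - ((-y - 1).toNat &&& x.toNat) := by omega
    rw [harg, pv_sub_and_testBit]
    cases h1 : (-y - 1).toNat.testBit b <;> cases h2 : x.toNat.testBit b <;> simp [h1, h2]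
  · have hneg : ¬ (0 : Int) ≤ -(((-x - 1).toNat - ((-x - 1).toNat &&& y.toNat) : Nat) : Int) - 1 := by
      have : (0 : Int) ≤ (((-x - 1).toNat - ((-x - 1).toNat &&& y.toNat) : Nat) : Int) := by positivity
      omega
    simp only [hx, hy, if_true, if_false, hneg]
    have harg : (-(-(((-x - 1).toNat - ((-x - 1).toNat &&& y.toNat) : Nat) : Int) - 1) - 1).toNat
        = (-x - 1).toNat - ((-x - 1).toNat &&& y.toNat) := by omega
    rw [harg, pv_sub_and_testBit]
    cases h1 : (-x - 1).toNat.testBit b <;> cases h2 : y.toNat.testBit b <;> simp [h1, h2]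
  · have hneg : ¬ (0 : Int) ≤ -(((-x - 1).toNat &&& (-y - 1).toNat : Nat) : Int) - 1 := by
      have : (0 : Int) ≤ (((-x - 1).toNat &&& (-y - 1).toNat : Nat) : Int) := by positivity
      omega
    simp only [hx, hy, if_false, hneg]
    have harg : (-(-(((-x - 1).toNat &&& (-y - 1).toNat : Nat) : Int) - 1) - 1).toNat
        = (-x - 1).toNat &&& (-y - 1).toNat := by omega
    rw [harg, Nat.testBit_and]
    cases h1 : (-x - 1).toNat.testBit b <;> cases h2 : (-y - 1).toNat.testBit b <;> simp [h1, h2]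

theorem pv_band_bor_ne (x y : Int) (b : Nat) :
    (PySem.Int.band (PySem.Int.bor x y) ((1 : Int) <<< b) ≠ 0)
      ↔ (PySem.Int.band x ((1 : Int) <<< b) ≠ 0 ∨ PySem.Int.band y ((1 : Int) <<< b) ≠ 0) := by
  rw [pv_band_two_pow_ne, pv_band_two_pow_ne, pv_band_two_pow_ne, pv_bor_bit]
  cases pvBit x b <;> cases pvBit y b <;> simp

-- A's bit test on max_or[i] coincides with 'some index ≥ i has bit b', i.e. next_set[b][i] < n
theorem pv_maxOr_bit (nums : List Int) (b : Nat) :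
    ∀ i, i < nums.length →
      ((PySem.Int.band (pvMaxOr nums i) ((1 : Int) <<< b) ≠ 0) ↔ pvNextSet nums b i < nums.length) := by
  intro i
  induction' hfuel : nums.length - i using Nat.strong_induction_on with fuel ih generalizing i
  intro hi
  rw [pvMaxOr, pvNextSet, dif_pos hi]
  by_cases h1 : i + 1 < nums.length
  · have ihs := ih (nums.length - (i + 1)) (by omega) (i + 1) rfl h1
    rw [dif_pos h1, pv_band_bor_ne]
    by_cases hb : PySem.Int.band (nums.getD i 0) ((1 : Int) <<< b) ≠ 0
    · rw [if_pos hb]; exact iff_of_true (Or.inr hb) hi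
    · rw [if_neg hb]; exact (or_iff_left hb).trans ihs
  · rw [dif_neg h1]
    by_cases hb : PySem.Int.band (nums.getD i 0) ((1 : Int) <<< b) ≠ 0
    · rw [if_pos hb]; exact iff_of_true hb hi
    · rw [if_neg hb]
      have hns : pvNextSet nums b (i + 1) = nums.length := by rw [pvNextSet, dif_neg h1]
      rw [hns]; exact iff_of_false hb (lt_irrefl _)

-- common closed form of one answer entry, phrased through pvNextSet
def pvAns (nums : List Int) (i : Nat) : Int :=
  (((List.range 32).foldl
    (fun mp (b : Nat) => if pvNextSet nums b i < nums.length then max mp (pvNextSet nums b i) else mp) i : Nat) : Int)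
    - (i : Int) + 1

theorem pv_getD_map_range {f : Nat → Nat} {b : Nat} (h : b < 32) (d : Nat) :
    ((List.range 32).map f).getD b d = f b := by
  simp [List.getD_eq_getElem?_getD, h]

theorem pv_altLoop_eq (nums : List Int) :
    ∀ k, k ≤ nums.length → ∀ last : List Nat,
      (∀ b, b < 32 → last.getD b nums.length = pvNextSet nums b k) →
      pvAltLoop nums k last = (List.range k).map (pvAns nums) := by
  intro k
  induction k with
  | zero => intro _ last _; simp [pvAltLoop]
  | succ k ih =>
    intro hk last hlast
    have hkn : k < nums.length := by omega
    rw [pvAltLoop]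
    have hlast' : ∀ b, b < 32 →
        ((List.range 32).map
          (fun (b : Nat) => if PySem.Int.band (nums.getD k 0) ((1 : Int) <<< b) ≠ 0 then k else last.getD b nums.length)).getD b nums.length
        = pvNextSet nums b k := by
      intro b hb
      rw [pv_getD_map_range hb]
      rw [hlast b hb]
      conv_rhs => rw [pvNextSet]
      simp [hkn]
    have hfar : (List.range 32).foldl
        (fun f b =>
          if ((List.range 32).map
              (fun (b : Nat) => if PySem.Int.band (nums.getD k 0) ((1 : Int) <<< b) ≠ 0 then k else last.getD b nums.length)).getD b nums.length < nums.length
          then max f (((List.range 32).map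
              (fun (b : Nat) => if PySem.Int.band (nums.getD k 0) ((1 : Int) <<< b) ≠ 0 then k else last.getD b nums.length)).getD b nums.length)
          else f) k
        = (List.range 32).foldl
        (fun mp (b : Nat) => if pvNextSet nums b k < nums.length then max mp (pvNextSet nums b k) else mp) k := by
      apply PySem.List.foldl_congr_mem
      intro acc b hb
      have hb32 : b < 32 := by simpa using List.mem_range.mp hb
      rw [hlast' b hb32]
    show pvAltLoop nums k _ ++ _ = _
    rw [hfar, ih (by omega) _ hlast']
    conv_rhs => rw [List.range_succ, List.map_append]
    rfl

theorem pv_A_entry (nums : List Int) (i : Nat) (hi : i < nums.length) :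
    ((((List.range 32).foldl
        (fun mp (b : Nat) => if PySem.Int.band (pvMaxOr nums i) ((1 : Int) <<< b) ≠ 0 then max mp (pvNextSet nums b i) else mp) i : Nat) : Int)
      - (i : Int) + 1) = pvAns nums i := by
  unfold pvAns
  congr 2
  apply congrArg
  apply PySem.List.foldl_congr_mem
  intro acc b _
  by_cases hc : pvNextSet nums b i < nums.length
  · simp [hc, (pv_maxOr_bit nums b i hi).mpr hc]
  · have := (pv_maxOr_bit nums b i hi).not.mpr hc
    simp at this
    simp [hc, this]

-- ===== VERDICT (by name: the statement is the Claim_ definition above) =====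
theorem smallest_subarrays_spec : Claim_equal_smallest_subarrays := by
  intro nums _
  unfold Spec_smallest_subarrays smallest_subarrays smallest_subarrays_alt
  have hinit : ∀ b, b < 32 →
      (List.replicate 32 nums.length).getD b nums.length = pvNextSet nums b nums.length := by
    intro b hb
    rw [List.getD_replicate _ hb, pvNextSet]
    simp
  rw [pv_altLoop_eq nums nums.length le_rfl _ hinit]
  by_cases h0 : nums.length = 0
  · simp [h0]
  · simp only [h0, if_false]
    apply List.map_congr_left
    intro i hi
    have hi' : i < nums.length := List.mem_range.mp hi
    exact pv_A_entry nums i hi'
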